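-- pv_equiv track=rewrite | github.com/ASTERISC-Teaching/codesprouts-dojo | cia/level-5/cia-webpage/server.py | simple_hash
-- ===== SOURCE A (Python) =====
-- def simple_hash(input_str):
--     # Convert to uppercase for case-insensitive counting
--     s = input_str.upper()
--     char_count = {}
--
--     # Count each letter
--     for ch in s:
--         if ch.isalpha():  # equivalent to isLetter(char)
--             char_count[ch] = char_count.get(ch, 0) + 1
--
--     # Sort characters alphabetically
--     sorted_chars = sorted(char_count.keys())
--
--     # Build the hash string
--     hash_str = ''.join(f"{ch}{char_count[ch]}" for ch in sorted_chars)
--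
--     return hash_str
-- ===== SOURCE B (Python) =====
-- def _runs(letters):
--     # run-length encode a sorted list: [(char, run length), ...]
--     if not letters:
--         return []
--     c = letters[0]
--     k = 1
--     while k < len(letters) and letters[k] == c:
--         k += 1
--     return [(c, k)] + _runs(letters[k:])
--
--
-- def simple_hash(input_str):
--     letters = sorted(ch for ch in input_str.upper() if ch.isalpha())
--     return ''.join(f"{c}{n}" for c, n in _runs(letters))
-- ===== Notes on version B (the rewrite author's own statement) =====
-- stated objective: alternative
-- what changed: The counting dictionary is gone: B sorts the filtered uppercased characters and run-length encodes the consecutive equal runs, so ordering and counts both come from the sort itself.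
import Mathlib
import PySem

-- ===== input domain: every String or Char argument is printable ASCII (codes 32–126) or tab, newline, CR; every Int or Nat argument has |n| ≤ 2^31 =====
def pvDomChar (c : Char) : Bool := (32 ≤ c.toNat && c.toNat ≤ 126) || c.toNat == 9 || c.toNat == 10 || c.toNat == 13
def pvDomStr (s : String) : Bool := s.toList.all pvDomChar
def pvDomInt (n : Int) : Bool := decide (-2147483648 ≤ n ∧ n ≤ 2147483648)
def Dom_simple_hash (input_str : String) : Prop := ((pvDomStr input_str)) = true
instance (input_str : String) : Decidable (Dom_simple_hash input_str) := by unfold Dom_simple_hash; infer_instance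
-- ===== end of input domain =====

-- B replaces A's counting dictionary by sorting the filtered uppercased characters and
-- run-length encoding consecutive equal runs (objective: alternative).


-- ===== PORT A =====
-- char_count[ch] is ported as getD ch 0: ch is always a key there (it came from keys()), so no KeyError is reachable.
def simple_hash (input_str : String) : String :=
  let s := PySem.Str.upper input_str
  let char_count : PySem.Dict Char Int :=
    s.toList.foldl
      (fun d ch => if PySem.Chars.isalpha ch then d.insert ch (d.getD ch 0 + 1) else d)
      PySem.Dict.empty
  let sorted_chars := PySem.List.sorted char_count.keys (fun x => x) false
  PySem.Str.join "" (sorted_chars.map (fun ch => String.ofList [ch] ++ PySem.Int.toStr (char_count.getD ch 0)))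

-- ===== PORT B =====
-- the inner while loop counts the length of the leading equal run (= takeWhile), letters[k:] is the rest (= dropWhile)
def pvRuns (letters : List Char) : List (Char × Int) :=
  match letters with
  | [] => []
  | c :: rest =>
      (c, ((rest.takeWhile (fun x => x == c)).length : Int) + 1) ::
        pvRuns (rest.dropWhile (fun x => x == c))
termination_by letters.length
decreasing_by
  simp only [List.length_cons]
  exact Nat.lt_succ_of_le (List.length_dropWhile_le _ _)

def simple_hash_alt (input_str : String) : String :=
  let letters := PySem.List.sorted
      ((PySem.Str.upper input_str).toList.filter PySem.Chars.isalpha) (fun x => x) false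
  PySem.Str.join "" ((pvRuns letters).map (fun p => String.ofList [p.1] ++ PySem.Int.toStr p.2))

-- ===== PRECONDITION & SPEC =====
def Spec_simple_hash (input_str : String) (out : String) : Prop := out = simple_hash_alt input_str
instance (input_str : String) (out : String) : Decidable (Spec_simple_hash input_str out) := by unfold Spec_simple_hash; infer_instance

-- ===== CLAIM (what is proved, stated in full; the proofs are below) =====
def Claim_equal_simple_hash : Prop := ∀ (input_str : String), Dom_simple_hash input_str → Spec_simple_hash input_str (simple_hash input_str)

-- ===== LEMMAS AND PROOFS =====

-- a conditional fold is the fold over the filtered list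
theorem pv_foldl_if_filter {α β : Type} (p : α → Bool) (f : β → α → β) :
    ∀ (xs : List α) (init : β),
      xs.foldl (fun d x => if p x then f d x else d) init = (xs.filter p).foldl f init := by
  intro xs
  induction xs with
  | nil => intro init; rfl
  | cons x xs ih =>
      intro init
      by_cases h : p x = true
      · simp [h, ih]
      · simp [h, ih]

-- ofList is a sublist of its argument
theorem pv_ofList_sublist {α : Type} [BEq α] [LawfulBEq α] (l : List α) :
    (PySem.Set.ofList l).Sublist l := by
  induction l using List.reverseRecOn with
  | nil => simp [PySem.Set.ofList_nil]
  | append_singleton xs x ih =>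
      rw [PySem.Set.ofList_append_singleton, PySem.Set.add_eq_ite]
      split
      · exact ih.trans (List.sublist_append_left _ _)
      · exact List.Sublist.append ih (List.Sublist.refl _)

-- discard c of ofList of (all-c run ++ rest with c ∉ rest) is ofList rest
theorem pv_discard_ofList_run (c : Char) :
    ∀ (run rest : List Char), (∀ x ∈ run, x = c) → c ∉ rest →
      PySem.Set.discard (PySem.Set.ofList (run ++ rest)) c = PySem.Set.ofList rest := by
  intro run
  induction run with
  | nil =>
      intro rest _ hc
      show List.filter _ _ = _
      apply List.filter_eq_self.mpr
      intro a ha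
      have hmem : a ∈ rest := (PySem.Set.mem_ofList rest a).mp ha
      have hac : a ≠ c := fun h => hc (h ▸ hmem)
      simp [hac]
  | cons r run ih =>
      intro rest hrun hc
      have hr : r = c := hrun r (by simp)
      subst hr
      rw [List.cons_append, PySem.Set.ofList_cons]
      show List.filter _ _ = _
      have ihx := ih rest (fun x hx => hrun x (by simp [hx])) hc
      simp only [List.filter_cons, beq_self_eq_true, Bool.not_true, Bool.false_eq_true,
        if_false]
      have : List.filter (fun y => !y == r) (PySem.Set.discard (PySem.Set.ofList (run ++ rest)) r)
          = PySem.Set.discard (PySem.Set.ofList (run ++ rest)) r := by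
        apply List.filter_eq_self.mpr
        intro a ha
        have := (PySem.Set.mem_discard _ _ _).mp ha
        simp [this.2]
      rw [this, ihx]

-- run-length encoding of a sorted list is (distinct chars, their counts)
-- run-length encoding of a sorted list lists the distinct chars with their counts
theorem pv_rle_sorted :
    ∀ (M : List Char), M.Pairwise (· ≤ ·) →
      pvRuns M = (PySem.Set.ofList M).map (fun c => (c, (List.count c M : Int))) := by
  intro M
  induction M using pvRuns.induct with
  | case1 => intro _; simp [pvRuns, PySem.Set.ofList_nil]
  | case2 c rest ih =>
      intro h
      have hle : ∀ x ∈ rest, c ≤ x := fun x hx => (List.pairwise_cons.mp h).1 x hx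
      have hrest : rest.Pairwise (· ≤ ·) := (List.pairwise_cons.mp h).2
      have hsplit : rest.takeWhile (fun x => x == c) ++ rest.dropWhile (fun x => x == c) = rest :=
        List.takeWhile_append_dropWhile
      have hrun : ∀ x ∈ rest.takeWhile (fun x => x == c), x = c := by
        intro x hx
        have hpx := List.mem_takeWhile_imp (p := fun y => y == c) hx
        exact eq_of_beq hpx
      have hsub : (rest.dropWhile (fun x => x == c)).Sublist rest := List.dropWhile_sublist _
      have hrest' : (rest.dropWhile (fun x => x == c)).Pairwise (· ≤ ·) := hrest.sublist hsub
      have hc : c ∉ rest.dropWhile (fun x => x == c) := by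
        intro hmem
        cases hdw : rest.dropWhile (fun x => x == c) with
        | nil => rw [hdw] at hmem; exact absurd hmem (List.not_mem_nil)
        | cons h0 t =>
            have hwit : rest.dropWhile (fun x => x == c) ≠ [] := by rw [hdw]; simp
            have hne' := List.head_dropWhile_not (fun x => x == c) hwit
            have hne : ¬ ((rest.dropWhile (fun x => x == c)).head hwit == c) = true := by
              simp [hne']
            have hh0 : (rest.dropWhile (fun x => x == c)).head hwit = h0 := by
              simp [hdw]
            rw [hh0] at hne
            have hh0c : h0 ≠ c := fun he => hne (by simp [he])
            have hh0m : h0 ∈ rest := hsub.mem (by rw [hdw]; simp)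
            have hlt : c < h0 := lt_of_le_of_ne (hle h0 hh0m) (Ne.symm hh0c)
            rw [hdw] at hmem
            rcases List.mem_cons.mp hmem with he | ht
            · exact hh0c he.symm
            · have : h0 ≤ c := by
                rw [hdw] at hrest'
                exact (List.pairwise_cons.mp hrest').1 c ht
              exact absurd (lt_of_lt_of_le hlt this) (lt_irrefl c)
      -- unfold one step of pvRuns
      rw [pvRuns]
      -- set side
      rw [PySem.Set.ofList_cons, ← hsplit, pv_discard_ofList_run c _ _ hrun hc, hsplit]
      -- counts
      have h1 : List.count c (rest.takeWhile (fun x => x == c))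
          = (rest.takeWhile (fun x => x == c)).length :=
        List.count_eq_length.mpr (fun b hb => (hrun b hb).symm)
      have h2 : List.count c (rest.dropWhile (fun x => x == c)) = 0 :=
        List.count_eq_zero.mpr hc
      have hcount_c : List.count c (c :: rest) = (rest.takeWhile (fun x => x == c)).length + 1 := by
        rw [List.count_cons_self]
        conv_lhs => rw [← hsplit]
        rw [List.count_append, h1, h2]
      rw [ih hrest', List.map_cons]
      congr 1
      · simp [hcount_c]
      · apply List.map_congr_left
        intro x hx
        have hx' : x ∈ rest.dropWhile (fun x => x == c) := (PySem.Set.mem_ofList _ _).mp hx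
        have hxc : x ≠ c := fun he => hc (he ▸ hx')
        have h3 : List.count x (rest.takeWhile (fun x => x == c)) = 0 :=
          List.count_eq_zero.mpr (fun hm => hxc (hrun x hm))
        have hcx : ¬ (c = x) := fun he => hxc he.symm
        have : List.count x (c :: rest) = List.count x (rest.dropWhile (fun x => x == c)) := by
          rw [List.count_cons]
          conv_lhs => rw [← hsplit]
          rw [List.count_append, h3]
          simp [hcx]
        rw [this]

-- set of a sorted list is the sorted set
theorem pv_ofList_sorted (L : List Char) :
    PySem.Set.ofList (PySem.List.sorted L (fun x => x) false)
      = PySem.List.sorted (PySem.Set.ofList L) (fun x => x) false := by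
  symm
  apply PySem.List.sorted_eq_of_perm_of_pairwise_lt
  · refine (List.perm_ext_iff_of_nodup (PySem.Set.nodup_ofList _) (PySem.Set.nodup_ofList _)).mpr ?_
    intro a
    rw [PySem.Set.mem_ofList, PySem.Set.mem_ofList, PySem.List.mem_sorted]
  · have hsubl := pv_ofList_sublist (PySem.List.sorted L (fun x => x) false)
    have hle : (PySem.Set.ofList (PySem.List.sorted L (fun x => x) false)).Pairwise (· ≤ ·) :=
      (PySem.List.sorted_pairwise L (fun x => x)).sublist hsubl
    have hne : (PySem.Set.ofList (PySem.List.sorted L (fun x => x) false)).Pairwise (· ≠ ·) :=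
      PySem.Set.nodup_ofList _
    exact (hle.and hne).imp (fun hab => lt_of_le_of_ne hab.1 hab.2)

set_option maxHeartbeats 1000000 in
theorem simple_hash_spec : Claim_equal_simple_hash := by
  intro input_str _
  unfold Spec_simple_hash simple_hash simple_hash_alt
  simp only [pv_foldl_if_filter, PySem.Dict.foldl_insert_getD_add_one_eq_counter,
    PySem.Dict.keys_counter, PySem.Dict.getD_counter]
  rw [pv_rle_sorted _ (PySem.List.sorted_pairwise _ _), pv_ofList_sorted, List.map_map]
  congr 1
  apply List.map_congr_left
  intro ch _
  have hperm := (PySem.List.sorted_perm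
      (List.filter PySem.Chars.isalpha (PySem.Chars.upper input_str.toList)) (fun x => x) false).count_eq ch
  simp [Function.comp, hperm]
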